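-- pv_equiv track=rewrite | github.com/simple0710/BOJ | bronze/[1236] 성 지키기.py | solution
-- ===== SOURCE A (Python) =====
-- def solution(N, M, data):
--   check1 = 0
--   check2 = 0
--   # X가 없는 행의 값을 구한다.
--   for i in range(N):
--     if 'X' not in data[i]:
--       check1 += 1
--   # X가 없는 열의 값을 구한다.
--   for j in range(M):
--     if 'X' not in [data[i][j] for i in range(N)]:
--       check2 += 1
--   # 가장 큰 값을 반환한다.
--   return max(check1, check2)
-- ===== SOURCE B (Python) =====
-- def solution(N, M, data):
--     row_has_x = [False] * N
--     col_has_x = [False] * M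
--     for i in range(N):
--         for j, ch in enumerate(data[i]):
--             if ch == 'X':
--                 row_has_x[i] = True
--                 if j < M:
--                     col_has_x[j] = True
--     return max(row_has_x.count(False), col_has_x.count(False))
-- ===== Notes on version B (the rewrite author's own statement) =====
-- stated objective: alternative
-- what changed: A makes two independent scans (one over rows, then one building a fresh column list per column); B makes a single fused pass that marks per-row and per-column has-X boolean tables and counts the unmarked entries at the end.
import Mathlib
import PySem

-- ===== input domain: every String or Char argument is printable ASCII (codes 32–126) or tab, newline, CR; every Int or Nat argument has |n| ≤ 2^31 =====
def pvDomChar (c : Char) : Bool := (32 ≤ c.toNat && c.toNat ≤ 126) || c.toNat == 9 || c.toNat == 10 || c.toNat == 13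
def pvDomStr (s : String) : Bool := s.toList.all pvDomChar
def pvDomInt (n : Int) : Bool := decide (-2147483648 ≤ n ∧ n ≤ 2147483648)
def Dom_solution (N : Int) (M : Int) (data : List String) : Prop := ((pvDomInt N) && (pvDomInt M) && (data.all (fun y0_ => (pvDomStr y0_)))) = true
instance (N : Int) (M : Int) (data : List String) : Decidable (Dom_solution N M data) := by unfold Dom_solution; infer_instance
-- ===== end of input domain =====

-- B replaces A's two independent scans (rows, then one fresh column list per column) by one
-- fused pass that marks per-row / per-column 'has X' boolean tables and counts at the end
-- (objective: alternative decomposition, same O(N·M) cost).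

-- ===== PORT A =====
def solution (N : Int) (M : Int) (data : List String) : Int :=
  let check1 : Int := (PySem.List.pyRange 0 N).foldl
    (fun c i => if (!(PySem.Str.isIn "X" (PySem.List.pyGetD data i ""))) = true then c + 1 else c) 0
  let check2 : Int := (PySem.List.pyRange 0 M).foldl
    (fun c j => if (!(((PySem.List.pyRange 0 N).map
        (fun i => PySem.List.pyGetD (PySem.List.pyGetD data i "").toList j ' ')).contains 'X')) = true
      then c + 1 else c) 0
  max check1 check2

-- ===== PORT B =====
-- inner-loop body of Source B: one enumerated character p = (j, ch) of row i
def pvStepB (M : Int) (i : Int) (st2 : List Bool × List Bool) (p : Int × Char) : List Bool × List Bool :=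
  if p.2 = 'X' then
    (st2.1.set i.toNat true, if p.1 < M then st2.2.set p.1.toNat true else st2.2)
  else st2

-- body of Source B's outer loop: scan row i, updating (row_has_x, col_has_x)
def pvRowB (M : Int) (data : List String) (st : List Bool × List Bool) (i : Int) : List Bool × List Bool :=
  (PySem.List.enumerate (PySem.List.pyGetD data i "").toList).foldl (pvStepB M i) st

def solution_alt (N : Int) (M : Int) (data : List String) : Int :=
  let st := (PySem.List.pyRange 0 N).foldl (pvRowB M data)
    (List.replicate N.toNat false, List.replicate M.toNat false)
  max (st.1.count false : Int) (st.2.count false : Int)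

-- ===== PRECONDITION & SPEC =====
-- Pre_ = exactly the inputs where Python A raises no IndexError: the first N rows exist and
-- each of them has at least M characters.
def Pre_solution (N : Int) (M : Int) (data : List String) : Prop :=
  N ≤ (data.length : Int) ∧ ∀ s ∈ data.take N.toNat, M ≤ (s.toList.length : Int)
instance (N : Int) (M : Int) (data : List String) : Decidable (Pre_solution N M data) := by
  unfold Pre_solution; infer_instance

def pvWitness_solution : Int × Int × List String := (2, 2, ["X.", ".X"])

def Spec_solution (N : Int) (M : Int) (data : List String) (out : Int) : Prop := out = solution_alt N M data
instance (N : Int) (M : Int) (data : List String) (out : Int) : Decidable (Spec_solution N M data out) := by unfold Spec_solution; infer_instance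

-- ===== CLAIM (what is proved, stated in full; the proofs are below) =====
def Claim_equal_solution : Prop := ∀ (N : Int) (M : Int) (data : List String), Dom_solution N M data → Pre_solution N M data → Spec_solution N M data (solution N M data)

-- ===== LEMMAS AND PROOFS =====

lemma pvPyRangeCast (b : Int) :
    PySem.List.pyRange 0 b = List.map (fun k : Nat => (k : Int)) (List.range b.toNat) := by
  by_cases h : b ≤ 0
  · have h1 : PySem.List.pyRange 0 b = [] := by simp [PySem.List.pyRange]; omega
    have h2 : b.toNat = 0 := by omega
    simp [h1, h2]
  · have hb : b = ((b.toNat : Nat) : Int) := by omega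
    conv_lhs => rw [hb]
    exact PySem.List.pyRange_zero_natCast b.toNat

lemma pvStepB_len (M i : Int) (st : List Bool × List Bool) (p : Int × Char) :
    (pvStepB M i st p).1.length = st.1.length ∧ (pvStepB M i st p).2.length = st.2.length := by
  unfold pvStepB; split <;> [skip; simp]; split <;> simp

lemma pvInner_len (M i : Int) (l : List (Int × Char)) :
    ∀ st : List Bool × List Bool,
      (l.foldl (pvStepB M i) st).1.length = st.1.length ∧
      (l.foldl (pvStepB M i) st).2.length = st.2.length := by
  induction l with
  | nil => intro st; simp
  | cons p t ih =>
    intro st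
    have h := pvStepB_len M i st p
    simpa [List.foldl_cons, h.1, h.2] using ih (pvStepB M i st p)

lemma pvInner_row (M i : Int) (cs : List Char) :
    ∀ (k : Int) (st : List Bool × List Bool),
      ((PySem.List.enumerate cs k).foldl (pvStepB M i) st).1 =
        if 'X' ∈ cs then st.1.set i.toNat true else st.1 := by
  induction cs with
  | nil => intro k st; simp [PySem.List.enumerate]
  | cons c t ih =>
    intro k st
    have he : PySem.List.enumerate (c::t) k = (k, c) :: PySem.List.enumerate t (k+1) := by
      simp [PySem.List.enumerate]
    rw [he, List.foldl_cons]
    by_cases hc : c = 'X'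
    · rw [ih (k+1)]
      by_cases ht : 'X' ∈ t <;>
        simp [pvStepB, hc, ht, List.set_set]
    · rw [ih (k+1)]
      by_cases ht : 'X' ∈ t <;>
        simp [pvStepB, hc, ht, Ne.symm hc]

-- shifting the enumerate offset by one in the column condition
lemma pvExShift (c : Char) (tl : List Char) (k j : Nat) :
    (∃ u ∈ List.range (c::tl).length, (c::tl)[u]? = some 'X' ∧ k + u = j)
    ↔ ((c = 'X' ∧ k = j) ∨ (∃ u ∈ List.range tl.length, tl[u]? = some 'X' ∧ (k+1) + u = j)) := by
  constructor
  · rintro ⟨u, hu, h1, h2⟩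
    match u with
    | 0 =>
      left
      simp only [List.getElem?_cons_zero, Option.some.injEq] at h1
      exact ⟨h1, by omega⟩
    | Nat.succ v =>
      right
      refine ⟨v, ?_, by simpa using h1, by omega⟩
      simp only [List.mem_range, List.length_cons] at hu ⊢
      omega
  · rintro (⟨rfl, rfl⟩ | ⟨v, hv, h1, h2⟩)
    · exact ⟨0, by simp, by simp, by omega⟩
    · refine ⟨v+1, ?_, by simpa using h1, by omega⟩
      simp only [List.mem_range, List.length_cons] at hv ⊢
      omega

lemma pvInner_col (M i : Int) (cs : List Char) :
    ∀ (k : Nat) (st : List Bool × List Bool) (j : Nat),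
      (((PySem.List.enumerate cs (k : Int)).foldl (pvStepB M i) st).2)[j]? =
        if ((j : Int) < M ∧ j < st.2.length ∧
            ∃ u ∈ List.range cs.length, cs[u]? = some 'X' ∧ k + u = j)
        then some true else st.2[j]? := by
  induction cs with
  | nil => intro k st j; simp [PySem.List.enumerate]
  | cons c t ih =>
    intro k st j
    have he : PySem.List.enumerate (c::t) (k : Int) = ((k : Int), c) :: PySem.List.enumerate t ((k : Int)+1) := by
      simp [PySem.List.enumerate]
    have hk1 : ((k : Int) + 1) = ((k + 1 : Nat) : Int) := by push_cast; ring
    rw [he, List.foldl_cons, hk1, ih (k+1) (pvStepB M i st ((k : Int), c)) j,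
      (pvStepB_len M i st ((k : Int), c)).2,
      if_congr (and_congr_right (fun _ => and_congr_right (fun _ => pvExShift c t k j))) rfl rfl]
    by_cases hc : c = 'X'
    · by_cases hm : (k : Int) < M
      · rw [show (pvStepB M i st ((k : Int), c)).2 = st.2.set k true from by
          simp [pvStepB, hc, hm]]
        by_cases hkj : k = j
        · subst hkj
          by_cases hkl : k < st.2.length
          · have h1 : ¬ ((k : Int) < M ∧ k < st.2.length ∧
                ∃ u ∈ List.range t.length, t[u]? = some 'X' ∧ (k+1) + u = k) := by
              rintro ⟨-, -, v, -, -, hv⟩; omega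
            have h2 : ((k : Int) < M ∧ k < st.2.length ∧
                ((c = 'X' ∧ k = k) ∨ ∃ u ∈ List.range t.length, t[u]? = some 'X' ∧ (k+1) + u = k)) :=
              ⟨hm, hkl, Or.inl ⟨hc, rfl⟩⟩
            rw [if_neg h1, if_pos h2, List.getElem?_set, if_pos rfl, if_pos hkl]
          · have h1 : ¬ ((k : Int) < M ∧ k < st.2.length ∧
                ∃ u ∈ List.range t.length, t[u]? = some 'X' ∧ (k+1) + u = k) := by
              rintro ⟨-, h, -⟩; exact hkl h
            have h2 : ¬ ((k : Int) < M ∧ k < st.2.length ∧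
                ((c = 'X' ∧ k = k) ∨ ∃ u ∈ List.range t.length, t[u]? = some 'X' ∧ (k+1) + u = k)) := by
              rintro ⟨-, h, -⟩; exact hkl h
            rw [if_neg h1, if_neg h2, List.getElem?_set, if_pos rfl, if_neg hkl,
               List.getElem?_eq_none (by omega : st.2.length ≤ k)]
        · have hset : (st.2.set k true)[j]? = st.2[j]? := by
            rw [List.getElem?_set, if_neg hkj]
          have hiff : ((j : Int) < M ∧ j < st.2.length ∧
                ((c = 'X' ∧ k = j) ∨ ∃ u ∈ List.range t.length, t[u]? = some 'X' ∧ (k+1) + u = j))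
              ↔ ((j : Int) < M ∧ j < st.2.length ∧
                ∃ u ∈ List.range t.length, t[u]? = some 'X' ∧ (k+1) + u = j) :=
            and_congr_right fun _ => and_congr_right fun _ => or_iff_right (fun h => hkj h.2)
          rw [hset, if_congr hiff rfl rfl]
      · rw [show (pvStepB M i st ((k : Int), c)).2 = st.2 from by simp [pvStepB, hc, hm]]
        have hiff : ((j : Int) < M ∧ j < st.2.length ∧
              ((c = 'X' ∧ k = j) ∨ ∃ u ∈ List.range t.length, t[u]? = some 'X' ∧ (k+1) + u = j))
            ↔ ((j : Int) < M ∧ j < st.2.length ∧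
              ∃ u ∈ List.range t.length, t[u]? = some 'X' ∧ (k+1) + u = j) :=
          and_congr_right fun hjM => and_congr_right fun _ =>
            or_iff_right (fun h => hm (h.2 ▸ hjM))
        rw [if_congr hiff rfl rfl]
    · rw [show (pvStepB M i st ((k : Int), c)).2 = st.2 from by simp [pvStepB, hc]]
      have hiff : ((j : Int) < M ∧ j < st.2.length ∧
            ((c = 'X' ∧ k = j) ∨ ∃ u ∈ List.range t.length, t[u]? = some 'X' ∧ (k+1) + u = j))
          ↔ ((j : Int) < M ∧ j < st.2.length ∧
            ∃ u ∈ List.range t.length, t[u]? = some 'X' ∧ (k+1) + u = j) :=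
        and_congr_right fun _ => and_congr_right fun _ => or_iff_right (fun h => hc h.1)
      rw [if_congr hiff rfl rfl]

lemma pvRowB_len (M : Int) (data : List String) (st : List Bool × List Bool) (i : Int) :
    (pvRowB M data st i).1.length = st.1.length ∧ (pvRowB M data st i).2.length = st.2.length := by
  unfold pvRowB; exact pvInner_len M i _ st

lemma pvOuter_row (M : Int) (data : List String) (L : List Int) :
    ∀ (st : List Bool × List Bool) (i : Nat),
      ((L.foldl (pvRowB M data) st).1)[i]? =
        if (∃ x ∈ L, x.toNat = i ∧ i < st.1.length ∧ 'X' ∈ (PySem.List.pyGetD data x "").toList)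
        then some true else st.1[i]? := by
  induction L with
  | nil => intro st i; simp
  | cons x L ih =>
    intro st i
    rw [List.foldl_cons, ih, (pvRowB_len M data st x).1,
      show (pvRowB M data st x).1 =
          if 'X' ∈ (PySem.List.pyGetD data x "").toList then st.1.set x.toNat true else st.1
        from pvInner_row M x _ 0 st]
    by_cases hx : 'X' ∈ (PySem.List.pyGetD data x "").toList
    · by_cases hxi : x.toNat = i
      · by_cases hil : i < st.1.length
        · by_cases hrest : ∃ y ∈ L, y.toNat = i ∧ i < st.1.length ∧
              'X' ∈ (PySem.List.pyGetD data y "").toList <;>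
            simp [hx, hxi, hil]
        · have hnone : st.1[i]? = none := List.getElem?_eq_none (by omega)
          simp [hx, hxi, hil]
      · by_cases hrest : ∃ y ∈ L, y.toNat = i ∧ i < st.1.length ∧
            'X' ∈ (PySem.List.pyGetD data y "").toList <;>
          simp [hx, hxi, hrest]
    · by_cases hrest : ∃ y ∈ L, y.toNat = i ∧ i < st.1.length ∧
          'X' ∈ (PySem.List.pyGetD data y "").toList <;>
        simp [hx, hrest]

lemma pvOuter_col (M : Int) (data : List String) (L : List Int) :
    ∀ (st : List Bool × List Bool) (j : Nat),
      ((L.foldl (pvRowB M data) st).2)[j]? =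
        if ((j : Int) < M ∧ j < st.2.length ∧ ∃ x ∈ L, (PySem.List.pyGetD data x "").toList[j]? = some 'X')
        then some true else st.2[j]? := by
  induction L with
  | nil => intro st j; simp
  | cons x L ih =>
    intro st j
    have h1 : ((pvRowB M data st x).2)[j]? =
        if ((j : Int) < M ∧ j < st.2.length ∧ (PySem.List.pyGetD data x "").toList[j]? = some 'X')
        then some true else st.2[j]? := by
      unfold pvRowB
      have hic := pvInner_col M x (PySem.List.pyGetD data x "").toList 0 st j
      simp only [Nat.cast_zero] at hic
      rw [hic]
      refine if_congr (and_congr_right (fun _ => and_congr_right (fun _ => ?_))) rfl rfl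
      constructor
      · rintro ⟨u, -, hu1, hu2⟩
        have : u = j := by omega
        exact this ▸ hu1
      · intro h
        refine ⟨j, List.mem_range.mpr ?_, h, by omega⟩
        exact (List.getElem?_eq_some_iff.mp h).1
    rw [List.foldl_cons, ih, (pvRowB_len M data st x).2, h1]
    by_cases hjM : (j : Int) < M
    · by_cases hjl : j < st.2.length
      · by_cases hx : (PySem.List.pyGetD data x "").toList[j]? = some 'X'
        · by_cases hrest : ∃ y ∈ L, (PySem.List.pyGetD data y "").toList[j]? = some 'X' <;>
            simp [hjM, hjl, hx, hrest]
        · by_cases hrest : ∃ y ∈ L, (PySem.List.pyGetD data y "").toList[j]? = some 'X' <;>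
            simp [hjM, hjl, hx, hrest]
      · simp [hjM, hjl]
    · simp [hjM]

lemma pvMapGetD (l : List Bool) : (List.range l.length).map (fun i => l.getD i false) = l := by
  apply List.ext_getElem
  · simp
  · intro i h1 h2
    simp [List.getD_eq_getElem?_getD, List.getElem?_eq_getElem h2]

lemma pvCountFalse (l : List Bool) :
    l.count false = (List.range l.length).countP (fun i => l.getD i false == false) := by
  conv_lhs => rw [← pvMapGetD l]
  rw [List.count_eq_countP, List.countP_map]
  rfl

lemma pvGetDSpace (l : List Char) (j : Nat) : (l.getD j ' ' = 'X') ↔ l[j]? = some 'X' := by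
  rw [List.getD_eq_getElem?_getD]
  cases l[j]? with
  | none => simp
  | some c => simp

-- ===== VERDICT (by name: the statement is the Claim_ definition above) =====
theorem solution_spec : Claim_equal_solution := by
  intro N M data _ _
  unfold Spec_solution solution solution_alt
  simp only []
  rw [PySem.List.foldl_count_if, PySem.List.foldl_count_if]
  -- final state of B's fold
  set st := (PySem.List.pyRange 0 N).foldl (pvRowB M data)
    (List.replicate N.toNat false, List.replicate M.toNat false) with hst
  have hlen : st.1.length = N.toNat ∧ st.2.length = M.toNat := by
    rw [hst]
    have : ∀ (L : List Int) (s : List Bool × List Bool),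
        (L.foldl (pvRowB M data) s).1.length = s.1.length ∧
        (L.foldl (pvRowB M data) s).2.length = s.2.length := by
      intro L
      induction L with
      | nil => intro s; simp
      | cons x L ih =>
        intro s
        have h := pvRowB_len M data s x
        simpa [h.1, h.2] using ih (pvRowB M data s x)
    simpa using this (PySem.List.pyRange 0 N)
      (List.replicate N.toNat false, List.replicate M.toNat false)
  -- rows
  have hrow : (0 : Int) + ((PySem.List.pyRange 0 N).countP
      (fun i => !PySem.Str.isIn "X" (PySem.List.pyGetD data i ""))) = (st.1.count false : Int) := by
    rw [pvCountFalse st.1, hlen.1, pvPyRangeCast N, List.countP_map, zero_add]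
    congr 1
    apply List.countP_congr
    intro i hi
    have hi' : i < N.toNat := List.mem_range.mp hi
    have hxiff : PySem.Str.isIn "X" (PySem.List.pyGetD data (i : Int) "") = true
        ↔ 'X' ∈ (PySem.List.pyGetD data (i : Int) "").toList := by
      rw [PySem.Str.isIn_iff_infix]
      have : ("X" : String).toList = ['X'] := by decide
      rw [this, List.singleton_infix_iff]
    have hget : st.1[i]? = if 'X' ∈ (PySem.List.pyGetD data (i : Int) "").toList
        then some true else some false := by
      rw [hst, pvOuter_row]
      have hrep : (List.replicate N.toNat false)[i]? = some false := by
        simp [hi']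
      by_cases hx : 'X' ∈ (PySem.List.pyGetD data (i : Int) "").toList
      · rw [if_pos ⟨(i : Int), by
            rw [pvPyRangeCast]; exact List.mem_map.mpr ⟨i, hi, rfl⟩,
            by simp, by simp [hi'], hx⟩, if_pos hx]
      · rw [if_neg, if_neg hx, hrep]
        rintro ⟨y, hy, hyi, -, hy2⟩
        rw [pvPyRangeCast] at hy
        obtain ⟨k, -, rfl⟩ := List.mem_map.mp hy
        simp only [Int.toNat_natCast] at hyi
        subst hyi
        exact hx hy2
    have hgd : st.1.getD i false = ((st.1[i]?).getD false) := List.getD_eq_getElem?_getD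
    rw [hgd, hget]
    by_cases hx : 'X' ∈ (PySem.List.pyGetD data (i : Int) "").toList
    · have hb : PySem.Str.isIn "X" (PySem.List.pyGetD data (i : Int) "") = true := hxiff.mpr hx
      rw [if_pos hx]; simp only [Function.comp_apply, hb]; simp
    · have hb : PySem.Str.isIn "X" (PySem.List.pyGetD data (i : Int) "") = false :=
        Bool.eq_false_iff.mpr (fun h => hx (hxiff.mp h))
      rw [if_neg hx]; simp only [Function.comp_apply, hb]; simp
  -- columns
  have hcol : (0 : Int) + ((PySem.List.pyRange 0 M).countP
      (fun j => !((PySem.List.pyRange 0 N).map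
        (fun i => PySem.List.pyGetD (PySem.List.pyGetD data i "").toList j ' ')).contains 'X')) =
      (st.2.count false : Int) := by
    rw [pvCountFalse st.2, hlen.2, pvPyRangeCast M, List.countP_map, zero_add]
    congr 1
    apply List.countP_congr
    intro j hj
    have hj' : j < M.toNat := List.mem_range.mp hj
    have hjM : (j : Int) < M := by omega
    have hciff : (((PySem.List.pyRange 0 N).map
        (fun i => PySem.List.pyGetD (PySem.List.pyGetD data i "").toList (j : Int) ' ')).contains 'X') = true
        ↔ ∃ x ∈ PySem.List.pyRange 0 N, (PySem.List.pyGetD data x "").toList[j]? = some 'X' := by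
      rw [List.contains_iff_mem, List.mem_map]
      constructor
      · rintro ⟨x, hx, hx2⟩
        refine ⟨x, hx, ?_⟩
        rw [← pvGetDSpace]
        rw [PySem.List.pyGetD_natCast] at hx2
        exact hx2
      · rintro ⟨x, hx, hx2⟩
        exact ⟨x, hx, by rw [PySem.List.pyGetD_natCast, pvGetDSpace]; exact hx2⟩
    have hget : st.2[j]? = if (∃ x ∈ PySem.List.pyRange 0 N, (PySem.List.pyGetD data x "").toList[j]? = some 'X')
        then some true else some false := by
      rw [hst, pvOuter_col]
      have hrep : (List.replicate M.toNat false)[j]? = some false := by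
        simp [hj']
      by_cases hx : ∃ x ∈ PySem.List.pyRange 0 N, (PySem.List.pyGetD data x "").toList[j]? = some 'X'
      · rw [if_pos ⟨hjM, by simp [hj'], hx⟩, if_pos hx]
      · rw [if_neg (by rintro ⟨-, -, h⟩; exact hx h), if_neg hx, hrep]
    have hgd : st.2.getD j false = ((st.2[j]?).getD false) := List.getD_eq_getElem?_getD
    rw [hgd, hget]
    by_cases hx : ∃ x ∈ PySem.List.pyRange 0 N, (PySem.List.pyGetD data x "").toList[j]? = some 'X'
    · have hb := hciff.mpr hx
      rw [if_pos hx]; simp only [Function.comp_apply, hb]; simp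
    · have hb : (List.map (fun i => PySem.List.pyGetD (PySem.List.pyGetD data i "").toList ((j : Nat) : Int) ' ')
          (PySem.List.pyRange 0 N)).contains 'X' = false :=
        Bool.eq_false_iff.mpr (fun h => hx (hciff.mp h))
      rw [if_neg hx]; simp only [Function.comp_apply, hb]; simp
  rw [hrow, hcol]
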